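-- pv_equiv track=rewrite | github.com/AlgoGajang/AndrewKim | programmers/kthNumber_220620.py | solution
-- ===== SOURCE A (Python) =====
-- def solution(array, commands):
--     answer = []
--     for arr in commands:
--         i = arr[0] # start index
--         j = arr[1] # end index
--         k = arr[2] # kth number
--         # sort selected array and pick kth number
--         ans = sorted(array[i - 1 : j])[k - 1]
--         answer.append(ans)
--     return answer
-- ===== SOURCE B (Python) =====
-- def quickselect(xs, r):
--     """Return the r-th smallest (0-indexed) element of xs via three-way partitioning."""
--     p = xs[0]
--     lt = [x for x in xs if x < p]
--     if r < len(lt):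
--         return quickselect(lt, r)
--     eqc = sum(1 for x in xs if x == p)
--     if r < len(lt) + eqc:
--         return p
--     gt = [x for x in xs if x > p]
--     return quickselect(gt, r - len(lt) - eqc)
--
-- def solution(array, commands):
--     answer = []
--     for arr in commands:
--         i, j, k = arr[0], arr[1], arr[2]
--         answer.append(quickselect(array[i - 1:j], k - 1))
--     return answer
-- ===== Notes on version B (the rewrite author's own statement) =====
-- stated objective: alternative
-- what changed: replaces sorting each slice and indexing into it with a three-way-partition quickselect that recurses into the side containing rank k-1; Pre_ excludes commands with k < 1, where A's sorted(...)[k-1] accidentally wraps around via Python negative indexing and B's quickselect raises instead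
-- outside the precondition, e.g. on solution([1, 2, 3], [[1, 3, 0]]): A returns [3], B raises IndexError
import Mathlib
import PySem

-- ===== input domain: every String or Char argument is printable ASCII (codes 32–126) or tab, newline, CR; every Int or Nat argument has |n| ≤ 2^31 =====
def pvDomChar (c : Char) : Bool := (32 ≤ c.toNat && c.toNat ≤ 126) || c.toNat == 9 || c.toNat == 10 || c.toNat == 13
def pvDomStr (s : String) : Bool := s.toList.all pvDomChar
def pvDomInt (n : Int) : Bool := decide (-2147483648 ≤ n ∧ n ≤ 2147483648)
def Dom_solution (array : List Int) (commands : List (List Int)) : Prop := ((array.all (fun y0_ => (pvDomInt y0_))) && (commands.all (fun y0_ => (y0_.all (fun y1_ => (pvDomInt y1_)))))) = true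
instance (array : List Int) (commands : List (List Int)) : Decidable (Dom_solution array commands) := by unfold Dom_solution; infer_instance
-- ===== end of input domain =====

-- B replaces 'sort the slice then index' by a three-way quickselect on the slice; return value only, no mutation.

-- ===== PORT A =====
def solution (array : List Int) (commands : List (List Int)) : List Int :=
  commands.foldl (fun answer arr =>
    let i := PySem.List.pyGetD arr 0 0
    let j := PySem.List.pyGetD arr 1 0
    let k := PySem.List.pyGetD arr 2 0
    let ans := PySem.List.pyGetD (PySem.List.sorted (PySem.List.slice array (some (i - 1)) (some j)) id false) (k - 1) 0
    answer ++ [ans]) []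

-- ===== PORT B =====
-- helper: the filtered part is strictly smaller (the pivot head never satisfies the filter)
theorem pv_filter_head_lt {p : Int} {t : List Int} (q : Int → Bool) (hq : q p = false) :
    ((p :: t).filter q).length < (p :: t).length := by
  simp [hq]
  exact List.length_filter_le q t

def quickselect (xs : List Int) (r : Nat) : Int :=
  match xs with
  | [] => 0
  | p :: t =>
    let lt := (p :: t).filter (fun x => decide (x < p))
    if r < lt.length then quickselect lt r
    else
      let eqc := ((p :: t).filter (fun x => decide (x = p))).length
      if r < lt.length + eqc then p
      else quickselect ((p :: t).filter (fun x => decide (p < x))) (r - lt.length - eqc)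
termination_by xs.length
decreasing_by
  · exact pv_filter_head_lt _ (by simp)
  · exact pv_filter_head_lt _ (by simp)

def solution_alt (array : List Int) (commands : List (List Int)) : List Int :=
  commands.foldl (fun answer arr =>
    let i := PySem.List.pyGetD arr 0 0
    let j := PySem.List.pyGetD arr 1 0
    let k := PySem.List.pyGetD arr 2 0
    answer ++ [quickselect (PySem.List.slice array (some (i - 1)) (some j)) (k - 1).toNat]) []

-- ===== PRECONDITION & SPEC =====
-- Pre_: each command has ≥ 3 entries and 1 ≤ k ≤ length of the selected slice. This excludes
-- the inputs where Python A raises (short commands, k - 1 out of range), and also commands with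
-- k < 1, on which A still returns a value only because sorted(...)[k-1] silently wraps around via
-- Python negative indexing — an accident of A's implementation, on which B's quickselect raises.
def Pre_solution (array : List Int) (commands : List (List Int)) : Prop :=
  ∀ c ∈ commands, 3 ≤ c.length ∧ 1 ≤ PySem.List.pyGetD c 2 0 ∧
    PySem.List.pyGetD c 2 0 ≤ ((PySem.List.slice array (some (PySem.List.pyGetD c 0 0 - 1)) (some (PySem.List.pyGetD c 1 0))).length : Int)
instance (array : List Int) (commands : List (List Int)) : Decidable (Pre_solution array commands) := by unfold Pre_solution; infer_instance

def pvWitness_solution : List Int × List (List Int) := ([1, 5, 2, 6, 3, 7, 4], [[2, 5, 3], [4, 4, 1], [1, 7, 3]])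

def Spec_solution (array : List Int) (commands : List (List Int)) (out : List Int) : Prop := out = solution_alt array commands
instance (array : List Int) (commands : List (List Int)) (out : List Int) : Decidable (Spec_solution array commands out) := by unfold Spec_solution; infer_instance

-- ===== CLAIM (what is proved, stated in full; the proofs are below) =====
def Claim_equal_solution : Prop := ∀ (array : List Int) (commands : List (List Int)), Dom_solution array commands → Pre_solution array commands → Spec_solution array commands (solution array commands)

-- ===== LEMMAS AND PROOFS =====

-- three-way partition is a permutation of the list
theorem pv_partition3_perm (xs : List Int) (p : Int) :
    (xs.filter (fun x => decide (x < p)) ++ (xs.filter (fun x => decide (x = p)) ++ xs.filter (fun x => decide (p < x)))).Perm xs := by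
  rw [List.perm_iff_count]
  intro a
  have hc : ∀ (q : Int → Bool), List.count a (xs.filter q) = if q a then List.count a xs else 0 := by
    intro q
    split
    · exact List.count_filter ‹_›
    · exact List.count_eq_zero.mpr (fun h => by
        rcases List.mem_filter.mp h with ⟨_, hqa⟩
        simp_all)
  simp [List.count_append, hc]
  rcases lt_trichotomy a p with h | h | h
  · simp [h, not_lt_of_gt h, ne_of_lt h]
  · simp [h]
  · simp [h, not_lt_of_gt h, ne_of_gt h]

-- sorted(xs) decomposes around any pivot p
theorem pv_sorted_partition (xs : List Int) (p : Int) :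
    PySem.List.sorted xs id false =
      PySem.List.sorted (xs.filter (fun x => decide (x < p))) id false
        ++ (xs.filter (fun x => decide (x = p))
        ++ PySem.List.sorted (xs.filter (fun x => decide (p < x))) id false) := by
  apply List.eq_of_perm_of_sorted (le := fun a b : Int => a ≤ b)
  · exact fun a b _ _ h h' => le_antisymm h h'
  · simpa using PySem.List.sorted_pairwise xs (id : Int → Int)
  · rw [List.pairwise_append, List.pairwise_append]
    refine ⟨by simpa using PySem.List.sorted_pairwise _ (id : Int → Int),
      ⟨?_, by simpa using PySem.List.sorted_pairwise _ (id : Int → Int), ?_⟩, ?_⟩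
    · apply List.pairwise_of_forall_mem_list
      intro a ha b hb
      have := (List.mem_filter.mp ha).2
      have := (List.mem_filter.mp hb).2
      simp_all
    · intro a ha b hb
      have ha' := (List.mem_filter.mp ha).2
      have hb' := (List.mem_filter.mp ((PySem.List.mem_sorted _ _ _ _).mp hb)).2
      simp at ha' hb'
      omega
    · intro a ha b hb
      have ha' := (List.mem_filter.mp ((PySem.List.mem_sorted _ _ _ _).mp ha)).2
      rcases List.mem_append.mp hb with hb | hb
      · have hb' := (List.mem_filter.mp hb).2
        simp at ha' hb'; omega
      · have hb' := (List.mem_filter.mp ((PySem.List.mem_sorted _ _ _ _).mp hb)).2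
        simp at ha' hb'; omega
  · exact ((PySem.List.sorted_perm xs id false).trans
      (((PySem.List.sorted_perm _ id false).append
        ((List.Perm.refl _).append (PySem.List.sorted_perm _ id false))).trans
        (pv_partition3_perm xs p)).symm).symm.symm

-- quickselect computes the r-th element of the Python-sorted list
theorem pv_quickselect_sorted (xs : List Int) (r : Nat) (h : r < xs.length) :
    quickselect xs r = (PySem.List.sorted xs id false).getD r 0 := by
  induction xs, r using quickselect.induct with
  | case1 r => simp at h
  | case2 r p t lt hlt ih =>
    simp only [lt] at hlt ih
    rw [quickselect]
    simp only [if_pos hlt]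
    rw [ih hlt, pv_sorted_partition (p :: t) p,
      List.getD_append _ _ _ _ (by rw [PySem.List.length_sorted]; exact hlt)]
  | case3 r p t lt hlt eqc heq =>
    simp only [lt] at hlt
    simp only [lt, eqc] at heq
    rw [quickselect]
    simp only [if_neg hlt, if_pos heq]
    rw [pv_sorted_partition (p :: t) p,
      List.getD_append_right _ _ _ _ (by rw [PySem.List.length_sorted]; omega)]
    rw [PySem.List.length_sorted]
    have hrin : r - (List.filter (fun x => decide (x < p)) (p :: t)).length < ((p :: t).filter (fun x => decide (x = p))).length := by omega
    rw [List.getD_append _ _ _ _ hrin, List.getD_eq_getElem _ _ hrin]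
    have hm := List.getElem_mem hrin
    have h2 := (List.mem_filter.mp hm).2
    exact (of_decide_eq_true h2).symm
  | case4 r p t lt hlt eqc heq ih =>
    simp only [lt] at hlt
    simp only [lt, eqc] at heq ih
    rw [quickselect]
    simp only [if_neg hlt, if_neg heq]
    have hlen : (List.filter (fun x => decide (x < p)) (p :: t)).length + (List.filter (fun x => decide (x = p)) (p :: t)).length + ((p :: t).filter (fun x => decide (p < x))).length = (p :: t).length := by
      have := (pv_partition3_perm (p :: t) p).length_eq
      simp only [List.length_append] at this
      omega
    rw [ih (by omega), pv_sorted_partition (p :: t) p,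
      List.getD_append_right _ _ _ _ (by rw [PySem.List.length_sorted]; omega),
      List.getD_append_right _ _ _ _ (by rw [PySem.List.length_sorted]; omega)]
    congr 1
    rw [PySem.List.length_sorted]

-- the per-command step: sorted-then-index equals quickselect at rank (k-1)
theorem pv_step_eq (array : List Int) (c : List Int)
    (hpre : 3 ≤ c.length ∧ 1 ≤ PySem.List.pyGetD c 2 0 ∧
      PySem.List.pyGetD c 2 0 ≤ ((PySem.List.slice array (some (PySem.List.pyGetD c 0 0 - 1)) (some (PySem.List.pyGetD c 1 0))).length : Int)) :
    PySem.List.pyGetD (PySem.List.sorted (PySem.List.slice array (some (PySem.List.pyGetD c 0 0 - 1)) (some (PySem.List.pyGetD c 1 0))) id false) (PySem.List.pyGetD c 2 0 - 1) 0 =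
    quickselect (PySem.List.slice array (some (PySem.List.pyGetD c 0 0 - 1)) (some (PySem.List.pyGetD c 1 0)))
      (PySem.List.pyGetD c 2 0 - 1).toNat := by
  obtain ⟨-, hlo, hhi⟩ := hpre
  set k := PySem.List.pyGetD c 2 0 with hk
  set sub := PySem.List.slice array (some (PySem.List.pyGetD c 0 0 - 1)) (some (PySem.List.pyGetD c 1 0)) with hsub
  rw [PySem.List.pyGetD_eq_getElem _ _ (by omega) (by rw [PySem.List.length_sorted]; omega),
    pv_quickselect_sorted sub _ (by omega),
    List.getD_eq_getElem _ _ (by rw [PySem.List.length_sorted]; omega)]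

theorem pv_fold_eq (array : List Int) (commands : List (List Int))
    (hpre : Pre_solution array commands) (acc : List Int) :
    commands.foldl (fun answer arr =>
      let i := PySem.List.pyGetD arr 0 0
      let j := PySem.List.pyGetD arr 1 0
      let k := PySem.List.pyGetD arr 2 0
      let ans := PySem.List.pyGetD (PySem.List.sorted (PySem.List.slice array (some (i - 1)) (some j)) id false) (k - 1) 0
      answer ++ [ans]) acc =
    commands.foldl (fun answer arr =>
      let i := PySem.List.pyGetD arr 0 0
      let j := PySem.List.pyGetD arr 1 0
      let k := PySem.List.pyGetD arr 2 0
      answer ++ [quickselect (PySem.List.slice array (some (i - 1)) (some j)) (k - 1).toNat]) acc := by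
  induction commands generalizing acc with
  | nil => rfl
  | cons c rest ih =>
    simp only [List.foldl_cons]
    rw [pv_step_eq array c (hpre c (by simp))]
    exact ih (fun c' hc' => hpre c' (by simp [hc'])) _

-- ===== VERDICT (by name: the statement is the Claim_ definition above) =====
theorem solution_spec : Claim_equal_solution := by
  intro array commands _ hpre
  unfold Spec_solution solution solution_alt
  exact pv_fold_eq array commands hpre []
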